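-- pv_equiv track=rewrite | github.com/edrickchang13/jobs | applicator/lever_handler.py | _best_eeo_option
-- ===== SOURCE A (Python) =====
-- def _best_eeo_option(target: str, opts: list) -> dict | None:
--     """Find the best matching option dict from a list of {t, v, i} dicts."""
--     t = target.lower()
--     # Exact match
--     for o in opts:
--         if o["t"].lower() == t:
--             return o
--     # Prefix / substring match
--     for o in opts:
--         ot = o["t"].lower()
--         if t[:6] in ot or ot[:6] in t:
--             return o
--     # Word overlap (≥1 meaningful word)
--     t_words = set(w for w in t.split() if len(w) > 3)
--     for o in opts:
--         ot_words = set(w for w in o["t"].lower().split() if len(w) > 3)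
--         if t_words & ot_words:
--             return o
--     return None
-- ===== SOURCE B (Python) =====
-- def _best_eeo_option(target: str, opts: list) -> dict | None:
--     """Single scan: rank each option by tier (1 exact, 2 substring, 3 word overlap),
--     keep the first option with the smallest tier seen so far."""
--     t = target.lower()
--     t_words = set(w for w in t.split() if len(w) > 3)
--     best = None
--     best_tier = 4
--     for o in opts:
--         ot = o["t"].lower()
--         if ot == t:
--             tier = 1
--         elif t[:6] in ot or ot[:6] in t:
--             tier = 2
--         elif t_words & set(w for w in ot.split() if len(w) > 3):
--             tier = 3
--         else:
--             continue
--         if tier < best_tier: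
--             best_tier = tier
--             best = o
--     return best
-- ===== Notes on version B (the rewrite author's own statement) =====
-- stated objective: alternative
-- what changed: Replaces A's three sequential passes over opts with a single scan that assigns each option a match tier (1 exact, 2 substring, 3 word-overlap) and keeps the first option with the smallest tier.
-- outside the precondition, e.g. on _best_eeo_option('a', [{'t': 'a'}, {}]): A returns {'t': 'a'}, B raises KeyError
import Mathlib
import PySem

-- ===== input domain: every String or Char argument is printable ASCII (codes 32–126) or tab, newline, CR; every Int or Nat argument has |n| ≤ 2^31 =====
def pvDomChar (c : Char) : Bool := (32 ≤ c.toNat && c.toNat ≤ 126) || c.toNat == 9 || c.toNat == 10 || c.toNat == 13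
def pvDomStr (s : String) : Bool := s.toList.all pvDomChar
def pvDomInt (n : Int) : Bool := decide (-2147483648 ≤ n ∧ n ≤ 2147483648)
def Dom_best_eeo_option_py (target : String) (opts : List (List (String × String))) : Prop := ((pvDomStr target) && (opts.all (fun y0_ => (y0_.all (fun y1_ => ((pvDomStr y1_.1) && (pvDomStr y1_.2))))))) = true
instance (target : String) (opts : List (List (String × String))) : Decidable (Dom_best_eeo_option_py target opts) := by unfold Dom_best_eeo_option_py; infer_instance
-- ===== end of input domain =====

-- B replaces A's three sequential passes with a single scan keeping the first option
-- of the smallest match tier (alternative decomposition, same complexity).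

-- shared tiny helpers: o["t"] (total under Pre_: key "t" present) and the >3-letter word set
def pvGetT (o : List (String × String)) : String := (PySem.Dict.mk o).getD "t" ""
def pvWords (s : String) : PySem.Set String :=
  PySem.Set.ofList ((PySem.Str.split₀ s).filter (fun w => PySem.Str.len w > 3))

-- ===== PORT A =====
-- first loop: exact match
def pvPassExact (t : String) : List (List (String × String)) → Option (List (String × String))
  | [] => none
  | o :: rest => if PySem.Str.lower (pvGetT o) == t then some o else pvPassExact t rest

-- second loop: prefix / substring match
def pvPassSub (t : String) : List (List (String × String)) → Option (List (String × String))
  | [] => none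
  | o :: rest =>
    let ot := PySem.Str.lower (pvGetT o)
    if PySem.Str.isIn (PySem.Str.slice t none (some 6)) ot ||
       PySem.Str.isIn (PySem.Str.slice ot none (some 6)) t then some o else pvPassSub t rest

-- third loop: word overlap
def pvPassWords (tws : PySem.Set String) : List (List (String × String)) → Option (List (String × String))
  | [] => none
  | o :: rest =>
    let otws := pvWords (PySem.Str.lower (pvGetT o))
    if (PySem.Set.inter tws otws).isEmpty then pvPassWords tws rest else some o

def best_eeo_option_py (target : String) (opts : List (List (String × String))) : Option (List (String × String)) :=
  let t := PySem.Str.lower target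
  match pvPassExact t opts with
  | some o => some o
  | none =>
    match pvPassSub t opts with
    | some o => some o
    | none =>
      let t_words := pvWords t
      pvPassWords t_words opts

-- ===== PORT B =====
-- tier of one option: some 1 exact, some 2 substring, some 3 word overlap, none otherwise
def pvTier (t : String) (tws : PySem.Set String) (o : List (String × String)) : Option Nat :=
  let ot := PySem.Str.lower (pvGetT o)
  if ot == t then some 1
  else if PySem.Str.isIn (PySem.Str.slice t none (some 6)) ot ||
          PySem.Str.isIn (PySem.Str.slice ot none (some 6)) t then some 2
  else if (PySem.Set.inter tws (pvWords ot)).isEmpty then none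
  else some 3

-- one step of B's loop: replace the best candidate only on a strictly smaller tier
def pvStep (t : String) (tws : PySem.Set String)
    (acc : Option (Nat × List (String × String))) (o : List (String × String)) :
    Option (Nat × List (String × String)) :=
  match pvTier t tws o with
  | none => acc
  | some k =>
    match acc with
    | none => some (k, o)
    | some (bk, bo) => if k < bk then some (k, o) else some (bk, bo)

def best_eeo_option_py_alt (target : String) (opts : List (List (String × String))) : Option (List (String × String)) :=
  let t := PySem.Str.lower target
  let t_words := pvWords t
  (opts.foldl (pvStep t t_words) none).map Prod.snd

-- ===== PRECONDITION & SPEC =====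
-- Pre_ excludes inputs where some option dict lacks key "t" (Python KeyError); A may still
-- return on a few of those by matching an earlier option, but B reads every option's "t".
def Pre_best_eeo_option_py (target : String) (opts : List (List (String × String))) : Prop :=
  ∀ o ∈ opts, (PySem.Dict.mk o).contains "t" = true
instance (target : String) (opts : List (List (String × String))) : Decidable (Pre_best_eeo_option_py target opts) := by unfold Pre_best_eeo_option_py; infer_instance

def pvWitness_best_eeo_option_py : String × (List (List (String × String))) :=
  ("big data", [[("t", "Small Data"), ("v", "1")], [("t", "big data"), ("v", "2")]])

def Spec_best_eeo_option_py (target : String) (opts : List (List (String × String))) (out : Option (List (String × String))) : Prop := out = best_eeo_option_py_alt target opts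
instance (target : String) (opts : List (List (String × String))) (out : Option (List (String × String))) : Decidable (Spec_best_eeo_option_py target opts out) := by unfold Spec_best_eeo_option_py; infer_instance

-- ===== CLAIM (what is proved, stated in full; the proofs are below) =====
def Claim_equal_best_eeo_option_py : Prop := ∀ (target : String) (opts : List (List (String × String))), Dom_best_eeo_option_py target opts → Pre_best_eeo_option_py target opts → Spec_best_eeo_option_py target opts (best_eeo_option_py target opts)

-- ===== LEMMAS AND PROOFS =====

-- merging two ranked candidates, preferring the left one on equal tiers
def pvMerge (a b : Option (Nat × List (String × String))) : Option (Nat × List (String × String)) :=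
  match a, b with
  | none, b => b
  | a, none => a
  | some (ka, oa), some (kb, ob) => if kb < ka then some (kb, ob) else some (ka, oa)

-- the ranked result of A's pass chain
def pvBest (t : String) (tws : PySem.Set String) (opts : List (List (String × String))) :
    Option (Nat × List (String × String)) :=
  match pvPassExact t opts with
  | some o => some (1, o)
  | none =>
    match pvPassSub t opts with
    | some o => some (2, o)
    | none => (pvPassWords tws opts).map (fun o => (3, o))

theorem pvMerge_none_left (b : Option (Nat × List (String × String))) : pvMerge none b = b := by
  cases b <;> rfl

theorem pvMerge_none_right (a : Option (Nat × List (String × String))) : pvMerge a none = a := by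
  cases a <;> rfl

theorem pvMerge_assoc (a b c : Option (Nat × List (String × String))) :
    pvMerge (pvMerge a b) c = pvMerge a (pvMerge b c) := by
  rcases a with _ | ⟨ka, oa⟩
  · simp [pvMerge_none_left]
  rcases b with _ | ⟨kb, ob⟩
  · simp [pvMerge_none_left, pvMerge_none_right]
  rcases c with _ | ⟨kc, oc⟩
  · simp [pvMerge_none_right]
  by_cases h1 : kb < ka <;> by_cases h2 : kc < kb <;> by_cases h3 : kc < ka <;>
    simp [pvMerge, h1, h2, h3] <;> omega

theorem pvStep_eq_merge (t : String) (tws : PySem.Set String)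
    (acc : Option (Nat × List (String × String))) (o : List (String × String)) :
    pvStep t tws acc o = pvMerge acc ((pvTier t tws o).map (fun k => (k, o))) := by
  cases h : pvTier t tws o with
  | none => simp [pvStep, h, pvMerge_none_right]
  | some k =>
    rcases acc with _ | ⟨bk, bo⟩ <;> simp [pvStep, h, pvMerge]

-- A's pass chain at a cons step is exactly a merge with the head's tier
theorem pvBest_cons (t : String) (tws : PySem.Set String)
    (o : List (String × String)) (rest : List (List (String × String))) :
    pvBest t tws (o :: rest) = pvMerge ((pvTier t tws o).map (fun k => (k, o))) (pvBest t tws rest) := by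
  by_cases h1 : (PySem.Str.lower (pvGetT o) == t) = true
  · simp only [pvBest, pvPassExact, pvTier, h1, if_pos, Option.map_some]
    cases hx : pvPassExact t rest <;> cases hs : pvPassSub t rest <;>
      cases hw : pvPassWords tws rest <;> simp [pvMerge]
  · by_cases h2 : (PySem.Str.isIn (PySem.Str.slice t none (some 6)) (PySem.Str.lower (pvGetT o)) ||
        PySem.Str.isIn (PySem.Str.slice (PySem.Str.lower (pvGetT o)) none (some 6)) t) = true
    · simp only [pvBest, pvPassExact, pvPassSub, pvTier, h1, h2]
      cases hx : pvPassExact t rest <;> cases hs : pvPassSub t rest <;>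
        cases hw : pvPassWords tws rest <;> simp [hx, hs, hw, pvMerge]
    · by_cases h3 : (PySem.Set.inter tws (pvWords (PySem.Str.lower (pvGetT o)))).isEmpty = true
      · simp only [pvBest, pvPassExact, pvPassSub, pvPassWords, pvTier, h1, h2, h3]
        simp [pvMerge_none_left]
      · simp only [pvBest, pvPassExact, pvPassSub, pvPassWords, pvTier, h1, h2, h3]
        cases hx : pvPassExact t rest <;> cases hs : pvPassSub t rest <;>
          cases hw : pvPassWords tws rest <;> simp [hx, hs, hw, pvMerge]

theorem pvFoldl_eq_merge_best (t : String) (tws : PySem.Set String)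
    (opts : List (List (String × String))) :
    ∀ acc, opts.foldl (pvStep t tws) acc = pvMerge acc (pvBest t tws opts) := by
  induction opts with
  | nil => intro acc; simp [pvBest, pvPassExact, pvPassSub, pvPassWords, pvMerge_none_right]
  | cons o rest ih =>
    intro acc
    rw [List.foldl_cons, ih, pvStep_eq_merge, pvMerge_assoc, ← pvBest_cons]

theorem pvA_eq_best_map (t : String) (tws : PySem.Set String)
    (opts : List (List (String × String))) :
    (match pvPassExact t opts with
     | some o => some o
     | none =>
       match pvPassSub t opts with
       | some o => some o
       | none => pvPassWords tws opts) = (pvBest t tws opts).map Prod.snd := by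
  cases hx : pvPassExact t opts <;> cases hs : pvPassSub t opts <;>
    cases hw : pvPassWords tws opts <;> simp [pvBest, hx, hs, hw]

-- ===== VERDICT (by name: the statement is the Claim_ definition above) =====
theorem best_eeo_option_py_spec : Claim_equal_best_eeo_option_py := by
  intro target opts _ _
  show best_eeo_option_py target opts = best_eeo_option_py_alt target opts
  simp only [best_eeo_option_py, best_eeo_option_py_alt]
  rw [pvFoldl_eq_merge_best, pvMerge_none_left, pvA_eq_best_map]
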